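-- pv_equiv track=rewrite | github.com/mattdoug604/Rosalind | 2_bioinformatics_stronghold/rosalind_GRPH.py | overlap_seqs
-- ===== SOURCE A (Python) =====
-- def overlap_seqs(sequences):
--     for head1, seq1 in sequences.items():
--         suffix = seq1[-3:]
--         for head2, seq2 in sequences.items():
--             prefix = seq2[:3]
--             if seq1 != seq2:
--                 if suffix == prefix:
--                     yield (" ".join([head1, head2]))
-- ===== SOURCE B (Python) =====
-- def overlap_seqs(sequences):
--     # Index sequences by their 3-char prefix once, then look each suffix up:
--     # only true candidates are scanned, instead of every pair.
--     by_prefix = {}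
--     for head, seq in sequences.items():
--         by_prefix[seq[:3]] = by_prefix.get(seq[:3], []) + [(head, seq)]
--     out = []
--     for head1, seq1 in sequences.items():
--         for head2, seq2 in by_prefix.get(seq1[-3:], []):
--             if seq2 != seq1:
--                 out.append(" ".join([head1, head2]))
--     return out
-- ===== Notes on version B (the rewrite author's own statement) =====
-- stated objective: faster
-- what changed: B builds a one-pass index from 3-char prefix to the sequences carrying it, then for each sequence looks up only the candidates sharing its suffix, replacing A's inner scan over all pairs.
import Mathlib
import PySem

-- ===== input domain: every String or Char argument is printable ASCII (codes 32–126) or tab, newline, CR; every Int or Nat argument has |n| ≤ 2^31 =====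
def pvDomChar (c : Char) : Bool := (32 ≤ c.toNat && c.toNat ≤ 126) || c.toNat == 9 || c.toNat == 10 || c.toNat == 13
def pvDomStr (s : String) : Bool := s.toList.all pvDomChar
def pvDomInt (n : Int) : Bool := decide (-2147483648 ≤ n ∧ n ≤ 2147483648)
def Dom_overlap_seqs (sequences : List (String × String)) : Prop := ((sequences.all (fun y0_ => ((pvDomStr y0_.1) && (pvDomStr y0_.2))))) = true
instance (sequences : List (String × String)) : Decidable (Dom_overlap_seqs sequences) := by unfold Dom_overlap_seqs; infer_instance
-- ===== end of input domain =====

-- B replaces A's quadratic all-pairs scan by a prefix index built in one pass; return values proved equal.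

-- ===== PORT A =====
-- literal port: for each (head1,seq1), for each (head2,seq2), yield "head1 head2"
-- when seq1 != seq2 and seq1[-3:] == seq2[:3]; the generator's yields are the output list.
def overlap_seqs (sequences : List (String × String)) : List String :=
  sequences.foldl (fun acc p =>
    let suffix := PySem.List.slice p.2.toList (some (-3)) none
    sequences.foldl (fun acc2 q =>
      let pre := PySem.List.slice q.2.toList none (some 3)
      if p.2 ≠ q.2 then
        if suffix = pre then acc2 ++ [PySem.Str.join " " [p.1, q.1]] else acc2
      else acc2) acc) []

-- ===== PORT B =====
-- literal port of Source B: by_prefix[k] = by_prefix.get(k, []) + [(head, seq)] is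
-- Dict.modify k [] (· ++ [p]); then each suffix looks up only its candidate bucket.
def overlap_seqs_alt (sequences : List (String × String)) : List String :=
  let byPrefix : PySem.Dict (List Char) (List (String × String)) :=
    sequences.foldl
      (fun d p => d.modify (PySem.List.slice p.2.toList none (some 3)) [] (· ++ [p]))
      PySem.Dict.empty
  sequences.foldl (fun out p =>
    (byPrefix.getD (PySem.List.slice p.2.toList (some (-3)) none) []).foldl
      (fun out2 q => if q.2 ≠ p.2 then out2 ++ [PySem.Str.join " " [p.1, q.1]] else out2)
      out) []

-- ===== PRECONDITION & SPEC =====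
def Spec_overlap_seqs (sequences : List (String × String)) (out : List String) : Prop := out = overlap_seqs_alt sequences
instance (sequences : List (String × String)) (out : List String) : Decidable (Spec_overlap_seqs sequences out) := by unfold Spec_overlap_seqs; infer_instance

-- ===== CLAIM (what is proved, stated in full; the proofs are below) =====
def Claim_equal_overlap_seqs : Prop := ∀ (sequences : List (String × String)), Dom_overlap_seqs sequences → Spec_overlap_seqs sequences (overlap_seqs sequences)

-- ===== LEMMAS AND PROOFS =====

-- proof-side abbreviations for the shared pieces of both ports
def pvKey (q : String × String) : List Char := PySem.List.slice q.2.toList none (some 3)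
def pvSuf (p : String × String) : List Char := PySem.List.slice p.2.toList (some (-3)) none
def pvJoin (p q : String × String) : String := PySem.Str.join " " [p.1, q.1]

-- the bucket of key c holds exactly the sequences whose prefix is c, in order
lemma pvBucket (l : List (String × String)) (c : List Char) :
    ((l.foldl (fun d p => d.modify (pvKey p) [] (· ++ [p])) PySem.Dict.empty).getD c [])
      = l.filter (fun q => pvKey q == c) := by
  have h := PySem.Dict.getD_foldl_modify_append (l.map (fun p => (pvKey p, p)))
    (PySem.Dict.empty (κ := List Char)) c
  rw [List.foldl_map] at h
  simp only [List.filter_map, Function.comp_def, List.map_map, PySem.Dict.getD_empty,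
    List.nil_append] at h
  simpa using h

-- A's nested if-loop collapsed to filter+map
lemma pvInnerA (p : String × String) (l : List (String × String)) (acc : List String) :
    l.foldl (fun acc2 q =>
      if p.2 ≠ q.2 then
        if pvSuf p = pvKey q then acc2 ++ [pvJoin p q] else acc2
      else acc2) acc
      = acc ++ (l.filter (fun q => decide (p.2 ≠ q.2) && (pvSuf p == pvKey q))).map (pvJoin p) := by
  have h : (fun (acc2 : List String) q =>
      if p.2 ≠ q.2 then
        if pvSuf p = pvKey q then acc2 ++ [pvJoin p q] else acc2
      else acc2)
      = (fun acc2 q => if decide (p.2 ≠ q.2) && (pvSuf p == pvKey q) then acc2 ++ [pvJoin p q] else acc2) := by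
    funext a q
    by_cases h1 : p.2 = q.2 <;> by_cases h2 : pvSuf p = pvKey q <;> simp [h1, h2]
  rw [h, PySem.List.foldl_append_if]

-- B's bucket loop collapsed to filter+map
lemma pvInnerB (p : String × String) (l : List (String × String)) (acc : List String) :
    l.foldl (fun out2 q => if q.2 ≠ p.2 then out2 ++ [pvJoin p q] else out2) acc
      = acc ++ (l.filter (fun q => decide (q.2 ≠ p.2))).map (pvJoin p) := by
  have h : (fun (out2 : List String) q => if q.2 ≠ p.2 then out2 ++ [pvJoin p q] else out2)
      = (fun out2 q => if decide (q.2 ≠ p.2) then out2 ++ [pvJoin p q] else out2) := by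
    funext a q; by_cases h1 : q.2 = p.2 <;> simp [h1]
  rw [h, PySem.List.foldl_append_if]

lemma pvFilterEq (p : String × String) (l : List (String × String)) :
    (l.filter (fun q => pvKey q == pvSuf p)).filter (fun q => decide (q.2 ≠ p.2))
      = l.filter (fun q => decide (p.2 ≠ q.2) && (pvSuf p == pvKey q)) := by
  rw [List.filter_filter]
  apply List.filter_congr
  intro q _
  by_cases h1 : p.2 = q.2 <;> by_cases h2 : pvSuf p = pvKey q <;>
    simp [h1, h2, BEq.comm, eq_comm]

-- ===== VERDICT (by name: the statement is the Claim_ definition above) =====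
theorem overlap_seqs_spec : Claim_equal_overlap_seqs := by
  intro l _
  unfold Spec_overlap_seqs
  show l.foldl (fun acc p => l.foldl (fun acc2 q =>
        if p.2 ≠ q.2 then
          if pvSuf p = pvKey q then acc2 ++ [pvJoin p q] else acc2
        else acc2) acc) []
    = l.foldl (fun out p =>
        ((l.foldl (fun d p => d.modify (pvKey p) [] (· ++ [p])) PySem.Dict.empty).getD (pvSuf p) []).foldl
          (fun out2 q => if q.2 ≠ p.2 then out2 ++ [pvJoin p q] else out2) out) []
  have hstep : ∀ (out : List String) (p : String × String), p ∈ l →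
      ((l.foldl (fun d p => d.modify (pvKey p) [] (· ++ [p])) PySem.Dict.empty).getD (pvSuf p) []).foldl
          (fun out2 q => if q.2 ≠ p.2 then out2 ++ [pvJoin p q] else out2) out
        = out ++ (l.filter (fun q => decide (p.2 ≠ q.2) && (pvSuf p == pvKey q))).map (pvJoin p) := by
    intro out p _
    rw [pvBucket, pvInnerB, pvFilterEq]
  calc l.foldl (fun acc p => l.foldl (fun acc2 q =>
            if p.2 ≠ q.2 then
              if pvSuf p = pvKey q then acc2 ++ [pvJoin p q] else acc2
            else acc2) acc) []
      = l.foldl (fun (acc : List String) p =>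
          acc ++ (l.filter (fun q => decide (p.2 ≠ q.2) && (pvSuf p == pvKey q))).map (pvJoin p)) [] :=
        PySem.List.foldl_congr_mem l _ _ [] (fun acc x _ => pvInnerA x l acc)
    _ = l.foldl (fun out p =>
          ((l.foldl (fun d p => d.modify (pvKey p) [] (· ++ [p])) PySem.Dict.empty).getD (pvSuf p) []).foldl
            (fun out2 q => if q.2 ≠ p.2 then out2 ++ [pvJoin p q] else out2) out) [] :=
        (PySem.List.foldl_congr_mem l _ _ [] hstep).symm
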